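-- pv_equiv track=rewrite | github.com/mattblferrer/hackerrank | Priyanka and Toys.py | toys
-- ===== SOURCE A (Python) =====
-- def toys(w):
--     w = sorted(w)
--     min_w = w[0]
--     count = 1
--     for weight in w:
--         if weight > min_w + 4:
--             min_w = weight
--             count += 1
--
--     return count
-- ===== SOURCE B (Python) =====
-- def toys(w):
--     ws = sorted(w)
--     n = len(ws)
--     count = 0
--     i = 0
--     while i < n:
--         count += 1
--         # binary-search (bisect_right) for the first toy heavier than ws[i] + 4
--         x = ws[i] + 4
--         lo, hi = i, n
--         while lo < hi:
--             mid = (lo + hi) // 2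
--             if ws[mid] <= x:
--                 lo = mid + 1
--             else:
--                 hi = mid
--         i = lo
--     return count
-- ===== Notes on version B (the rewrite author's own statement) =====
-- stated objective: alternative
-- what changed: B counts one container per outer iteration and jumps over the whole covered group with a hand-written binary search (bisect_right) on the sorted list, instead of A's toy-by-toy linear fold tracking a (min_w, count) state.
import Mathlib
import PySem

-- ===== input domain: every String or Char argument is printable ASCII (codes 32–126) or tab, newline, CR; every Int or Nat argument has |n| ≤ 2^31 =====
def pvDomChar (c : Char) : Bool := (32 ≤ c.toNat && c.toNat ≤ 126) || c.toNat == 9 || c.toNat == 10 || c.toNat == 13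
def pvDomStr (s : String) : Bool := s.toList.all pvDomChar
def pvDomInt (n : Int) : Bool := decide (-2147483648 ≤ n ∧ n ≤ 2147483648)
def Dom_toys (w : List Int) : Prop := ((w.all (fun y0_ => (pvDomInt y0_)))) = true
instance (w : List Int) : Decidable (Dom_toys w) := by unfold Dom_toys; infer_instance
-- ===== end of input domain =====

-- B counts one container per outer iteration and jumps over its whole covered group with a
-- hand-written binary search on the sorted list, instead of A's toy-by-toy fold; same cost.

-- ===== PORT A =====
def toys (w : List Int) : Int :=
  let s := PySem.List.sorted w (fun x => x) false
  match s with
  | [] => 0   -- unreachable under Pre_toys: Python raises IndexError reading the first element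
  | m0 :: _ =>
    (s.foldl (fun (p : Int × Int) weight =>
      if weight > p.1 + 4 then (weight, p.2 + 1) else p) (m0, 1)).2

-- ===== PORT B =====
-- Source B's inner 'while lo < hi' binary search; the extra fuel argument only makes the loop a
-- structural recursion (each pass shrinks hi - lo, so fuel ≥ hi - lo never runs out);
-- ws[mid] is in range whenever lo < hi ≤ ws.length, so List.getD is exact at every access
def bisectGo (a : List Int) (x : Int) : Nat → Nat → Nat → Nat
  | 0, lo, _ => lo   -- unreachable: callers pass fuel ≥ hi - lo
  | fuel + 1, lo, hi =>
    if lo < hi then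
      if a.getD ((lo + hi) / 2) 0 ≤ x then bisectGo a x fuel ((lo + hi) / 2 + 1) hi
      else bisectGo a x fuel lo ((lo + hi) / 2)
    else lo

-- Source B's outer 'while i < n' loop: one container per iteration; fuel ≥ n - i + 1 suffices
-- since the binary search strictly advances i
def toysGo (ws : List Int) (n : Nat) : Nat → Nat → Int → Int
  | 0, _, count => count   -- unreachable: callers pass fuel ≥ n - i + 1
  | fuel + 1, i, count =>
    if i < n then
      toysGo ws n fuel (bisectGo ws (ws.getD i 0 + 4) n i n) (count + 1)
    else count

def toys_alt (w : List Int) : Int :=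
  let ws := PySem.List.sorted w (fun x => x) false
  toysGo ws ws.length (ws.length + 1) 0 0

-- ===== PRECONDITION & SPEC =====
-- Pre_toys excludes only the empty list, on which Python A raises IndexError reading the first element.
def Pre_toys (w : List Int) : Prop := w ≠ []
instance (w : List Int) : Decidable (Pre_toys w) := by unfold Pre_toys; infer_instance
def pvWitness_toys : List Int := [1, 7, 3]

def Spec_toys (w : List Int) (out : Int) : Prop := out = toys_alt w
instance (w : List Int) (out : Int) : Decidable (Spec_toys w out) := by unfold Spec_toys; infer_instance

-- ===== CLAIM (what is proved, stated in full; the proofs are below) =====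
def Claim_equal_toys : Prop := ∀ (w : List Int), Dom_toys w → Pre_toys w → Spec_toys w (toys w)

-- ===== LEMMAS AND PROOFS =====

-- the common reference recursion both ports are reduced to: one container per step,
-- the remainder being the toys strictly heavier than head + 4
def auxG : List Int → Int → Int
  | [], c => c
  | x :: t, c => auxG (t.filter (fun y => decide (x + 4 < y))) (c + 1)
  termination_by l _ => l.length
  decreasing_by
    simp only [List.length_unattach]
    exact Nat.lt_succ_of_le (le_trans (List.length_filter_le _ _) (by simp))

theorem auxG_cons (x : Int) (t : List Int) (c : Int) :
    auxG (x :: t) c = auxG (t.filter (fun y => decide (x + 4 < y))) (c + 1) := by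
  conv_lhs => rw [auxG.eq_def]

theorem fold_eq_auxG (l : List Int) (lo c : Int) (hs : l.Pairwise (· ≤ ·)) :
    (l.foldl (fun (p : Int × Int) weight =>
      if weight > p.1 + 4 then (weight, p.2 + 1) else p) (lo, c)).2
    = auxG (l.filter (fun y => decide (lo + 4 < y))) c := by
  induction l generalizing lo c with
  | nil => simp [auxG]
  | cons x t ih =>
    have hall := (List.pairwise_cons.mp hs).1
    have ht := (List.pairwise_cons.mp hs).2
    by_cases hx : x > lo + 4
    · have hxd : lo + 4 < x := hx
      rw [List.foldl_cons, if_pos hx,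
          List.filter_cons_of_pos (by simpa using hxd)]
      have htfilt : t.filter (fun y => decide (lo + 4 < y)) = t := by
        apply List.filter_eq_self.mpr
        intro y hy
        have := hall y hy
        simp only [decide_eq_true_eq]; omega
      rw [htfilt, auxG_cons]
      exact ih x (c + 1) ht
    · have hxd : ¬ (lo + 4 < x) := hx
      rw [List.foldl_cons, if_neg hx,
          List.filter_cons_of_neg (by simpa using hxd)]
      exact ih lo c ht

-- index-monotonicity of a pairwise-sorted list
theorem sorted_getD_mono (a : List Int) (hs : a.Pairwise (· ≤ ·))
    {i j : Nat} (hij : i ≤ j) (hj : j < a.length) :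
    a.getD i 0 ≤ a.getD j 0 := by
  rcases Nat.eq_or_lt_of_le hij with rfl | hlt
  · exact le_refl _
  · have hi : i < a.length := lt_trans hlt hj
    rw [List.getD_eq_getElem a 0 hi, List.getD_eq_getElem a 0 hj]
    exact (List.pairwise_iff_getElem.mp hs) i j hi hj hlt

-- the binary search never moves left …
theorem bisectGo_ge (a : List Int) (x : Int) :
    ∀ (fuel lo hi : Nat), lo ≤ bisectGo a x fuel lo hi := by
  intro fuel
  induction fuel with
  | zero => intro lo hi; simp [bisectGo]
  | succ k ih =>
    intro lo hi
    simp only [bisectGo]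
    split
    · split
      · exact le_trans (by omega) (ih ((lo + hi) / 2 + 1) hi)
      · exact ih lo ((lo + hi) / 2)
    · exact le_refl _

-- … and, with enough fuel, strictly advances past a covered lower end
theorem bisectGo_gt (a : List Int) (x : Int) :
    ∀ (fuel lo hi : Nat), hi - lo ≤ fuel → lo < hi → a.getD lo 0 ≤ x →
      lo < bisectGo a x fuel lo hi := by
  intro fuel
  induction fuel with
  | zero => intro lo hi h hlh _; omega
  | succ k ih =>
    intro lo hi h hlh hle
    simp only [bisectGo]
    simp only [hlh, if_pos]
    split
    · exact lt_of_lt_of_le (by omega) (bisectGo_ge a x k _ hi)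
    · rename_i hmid
      have hmlo : lo < (lo + hi) / 2 := by
        rcases Nat.lt_or_ge lo ((lo + hi) / 2) with h' | h'
        · exact h'
        · have : (lo + hi) / 2 = lo := by omega
          rw [this] at hmid; exact absurd hle hmid
      exact ih lo _ (by omega) hmlo hle

-- a position with everything ≤ x on its left and everything > x from it on is the count of elements ≤ x
theorem countP_eq_of_split (a : List Int) (x : Int) (lo : Nat) (hl : lo ≤ a.length)
    (hlo : ∀ j, j < lo → a.getD j 0 ≤ x)
    (hhi : ∀ j, lo ≤ j → j < a.length → x < a.getD j 0) :
    a.countP (fun y => decide (y ≤ x)) = lo := by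
  have h1 : (a.take lo).countP (fun y => decide (y ≤ x)) = lo := by
    have : ∀ y ∈ a.take lo, (fun y => decide (y ≤ x)) y = true := by
      intro y hy
      obtain ⟨j, hj, rfl⟩ := List.getElem_of_mem hy
      have hjlen : j < a.length := lt_of_lt_of_le (lt_of_lt_of_le hj (by simp)) hl
      have hjlo : j < lo := lt_of_lt_of_le hj (by simp [List.length_take])
      have := hlo j hjlo
      rw [List.getD_eq_getElem a 0 hjlen] at this
      simp only [List.getElem_take, decide_eq_true_eq]
      exact this
    rw [List.countP_eq_length.mpr this, List.length_take]
    omega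
  have h2 : (a.drop lo).countP (fun y => decide (y ≤ x)) = 0 := by
    rw [List.countP_eq_zero]
    intro y hy
    obtain ⟨j, hj, rfl⟩ := List.getElem_of_mem hy
    have hjlen : lo + j < a.length := by
      have := hj; simp [List.length_drop] at this; omega
    have := hhi (lo + j) (by omega) hjlen
    rw [List.getD_eq_getElem a 0 hjlen] at this
    simp only [List.getElem_drop, decide_eq_true_eq, not_le]
    omega
  conv_lhs => rw [← List.take_append_drop lo a]
  rw [List.countP_append, h1, h2]
  omega

-- the binary search on a sorted list computes the number of elements ≤ x
theorem bisect_correct (a : List Int) (x : Int) (hs : a.Pairwise (· ≤ ·)) :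
    ∀ (fuel lo hi : Nat), hi - lo ≤ fuel → lo ≤ hi → hi ≤ a.length →
      (∀ j, j < lo → a.getD j 0 ≤ x) →
      (∀ j, hi ≤ j → j < a.length → x < a.getD j 0) →
      bisectGo a x fuel lo hi = a.countP (fun y => decide (y ≤ x)) := by
  intro fuel
  induction fuel with
  | zero =>
    intro lo hi hf hlh hhl hlo hhi
    have heq : lo = hi := by omega
    subst heq
    simp only [bisectGo]
    exact (countP_eq_of_split a x lo hhl hlo (fun j hj => hhi j hj)).symm
  | succ k ih =>
    intro lo hi hf hlh hhl hlo hhi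
    rcases Nat.eq_or_lt_of_le hlh with rfl | hlt
    · simp only [bisectGo, lt_irrefl, if_neg, not_false_iff]
      exact (countP_eq_of_split a x lo hhl hlo (fun j hj => hhi j hj)).symm
    · simp only [bisectGo]
      simp only [hlt, if_pos]
      set mid := (lo + hi) / 2 with hmiddef
      have hmlo : lo ≤ mid := by omega
      have hmhi : mid < hi := by omega
      split
      · rename_i hle
        apply ih (mid + 1) hi (by omega) (by omega) hhl
        · intro j hj
          by_cases hjlo : j < lo
          · exact hlo j hjlo
          · have : a.getD j 0 ≤ a.getD mid 0 :=
              sorted_getD_mono a hs (by omega) (by omega)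
            omega
        · exact hhi
      · rename_i hgt
        rw [not_le] at hgt
        apply ih lo mid (by omega) hmlo (by omega) hlo
        intro j hj hjlen
        have : a.getD mid 0 ≤ a.getD j 0 := sorted_getD_mono a hs hj hjlen
        omega

-- on a sorted list, dropping the count of elements ≤ x leaves exactly the elements > x
theorem sorted_drop_countP (a : List Int) (x : Int) (hs : a.Pairwise (· ≤ ·)) :
    a.drop (a.countP (fun y => decide (y ≤ x))) = a.filter (fun y => decide (x < y)) := by
  induction a with
  | nil => simp
  | cons h t ih =>
    have hall := (List.pairwise_cons.mp hs).1
    have ht := (List.pairwise_cons.mp hs).2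
    by_cases hh : h ≤ x
    · rw [List.countP_cons, List.filter_cons]
      simp only [decide_eq_true hh, if_pos]
      have : ¬ (x < h) := by omega
      simp only [decide_eq_false this, Bool.false_eq_true, if_false]
      rw [List.drop_succ_cons]
      exact ih ht
    · have hcz : t.countP (fun y => decide (y ≤ x)) = 0 := by
        rw [List.countP_eq_zero]
        intro y hy
        have := hall y hy
        simp only [decide_eq_true_eq, not_le] at *
        omega
      rw [List.countP_cons, List.filter_cons, hcz]
      simp only [decide_eq_false hh, Bool.false_eq_true, if_false]
      have hxh : x < h := by omega
      simp only [decide_eq_true hxh, if_pos]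
      have : t.filter (fun y => decide (x < y)) = t := by
        apply List.filter_eq_self.mpr
        intro y hy
        have := hall y hy
        simp only [decide_eq_true_eq]; omega
      simp [this]

-- B's outer loop, started at index i of the sorted list, is auxG on the remaining suffix
theorem toysGo_eq_auxG (ws : List Int) (hs : ws.Pairwise (· ≤ ·)) :
    ∀ (fuel i : Nat) (c : Int), ws.length - i < fuel → i ≤ ws.length →
      toysGo ws ws.length fuel i c = auxG (ws.drop i) c := by
  intro fuel
  induction fuel with
  | zero =>
    intro i c hf _
    exact absurd hf (Nat.not_lt_zero _)
  | succ k ih =>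
    intro i c hf hi
    rcases Nat.eq_or_lt_of_le hi with rfl | hlt
    · simp only [toysGo, lt_irrefl, if_neg, not_false_iff]
      simp [auxG]
    · simp only [toysGo]
      simp only [hlt, if_pos]
      have hcnt : bisectGo ws (ws.getD i 0 + 4) ws.length i ws.length
          = ws.countP (fun y => decide (y ≤ ws.getD i 0 + 4)) := by
        apply bisect_correct ws _ hs ws.length i ws.length (by omega) (by omega) (le_refl _)
        · intro j hj
          have := sorted_getD_mono ws hs (le_of_lt hj) hlt
          omega
        · intro j hj hjlen; omega
      rw [hcnt]
      have hp := bisectGo_gt ws (ws.getD i 0 + 4) ws.length i ws.length (by omega) hlt (by omega)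
      rw [hcnt] at hp
      have hple : ws.countP (fun y => decide (y ≤ ws.getD i 0 + 4)) ≤ ws.length :=
        List.countP_le_length
      rw [ih _ (c + 1) (by omega) hple]
      rw [sorted_drop_countP ws (ws.getD i 0 + 4) hs]
      have hdrop : ws.drop i = ws.getD i 0 :: ws.drop (i + 1) := by
        rw [List.getD_eq_getElem ws 0 hlt]
        exact (List.drop_eq_getElem_cons hlt)
      -- elements at indices ≤ i are ≤ ws[i] + 4, so filtering ws equals filtering its suffix
      have hgen : ∀ q : Int → Bool, (∀ y ∈ ws.take (i + 1), q y = false) →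
          ws.filter q = (ws.drop (i + 1)).filter q := by
        intro q hq
        conv_lhs => rw [← List.take_append_drop (i + 1) ws]
        rw [List.filter_append,
            List.filter_eq_nil_iff.mpr (by intro y hy; simp [hq y hy]), List.nil_append]
      have hmemfalse : ∀ y ∈ ws.take (i + 1),
          (fun y => decide (ws.getD i 0 + 4 < y)) y = false := by
        intro y hy
        obtain ⟨j, hj, rfl⟩ := List.getElem_of_mem hy
        have hji : j ≤ i := by
          simp only [List.length_take] at hj; omega
        have hjlen : j < ws.length := lt_of_le_of_lt hji hlt
        have hmono := sorted_getD_mono ws hs hji hlt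
        have heq : (List.take (i + 1) ws)[j] = ws.getD j 0 := by
          rw [List.getD_eq_getElem ws 0 hjlen]
          simp [List.getElem_take]
        rw [heq]
        simp only [decide_eq_false_iff_not, not_lt]
        omega
      rw [hdrop, auxG_cons, hgen _ hmemfalse]

-- ===== VERDICT (by name: the statement is the Claim_ definition above) =====
theorem toys_spec : Claim_equal_toys := by
  intro w _ hpre
  unfold Spec_toys toys toys_alt
  obtain ⟨m0, t, hseq⟩ : ∃ m0 t, PySem.List.sorted w (fun x => x) false = m0 :: t := by
    rcases h : PySem.List.sorted w (fun x => x) false with _ | ⟨a, b⟩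
    · exact absurd ((PySem.List.sorted_eq_nil_iff w _ false).mp h) hpre
    · exact ⟨a, b, rfl⟩
  have hpw : (m0 :: t).Pairwise (· ≤ ·) := by
    have := PySem.List.sorted_pairwise (xs := w) (key := fun x : Int => x)
    rw [hseq] at this; exact this
  simp only [hseq]
  rw [toysGo_eq_auxG (m0 :: t) hpw ((m0 :: t).length + 1) 0 0 (by omega) (by omega)]
  rw [List.drop_zero, auxG]
  rw [fold_eq_auxG (m0 :: t) m0 1 hpw]
  rw [List.filter_cons]
  have : ¬ (m0 + 4 < m0) := by omega
  simp only [decide_eq_false this, Bool.false_eq_true, if_false]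
  norm_num
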